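-- pv_equiv track=rewrite | github.com/dabzse/HackerRank | Algorithms/Bit Manipulation/The Great XOR.py | theGreatXor
-- ===== SOURCE A (Python) =====
-- def theGreatXor(x):
--     # Write your code here
--     result = 0
--     bit_position = 0
--
--     while x > 0:
--         if x & 1 == 0:
--             result += (1 << bit_position)
--         bit_position += 1
--         x >>= 1
--
--     return result
-- ===== SOURCE B (Python) =====
-- def theGreatXor(x):
--     # Closed form: below the MSB of x, the zero bits of x sum to the
--     # full mask (2^bit_length - 1) minus the set bits (which sum to x).
--     if x <= 0:
--         return 0
--     return (1 << x.bit_length()) - 1 - x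
-- ===== Notes on version B (the rewrite author's own statement) =====
-- stated objective: simpler
-- what changed: Replaced the per-bit while loop with the closed form (1 << x.bit_length()) - 1 - x, returning 0 when x is non-positive: the full mask below the MSB minus the set bits is the sum of the zero-bit powers.
import Mathlib
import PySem

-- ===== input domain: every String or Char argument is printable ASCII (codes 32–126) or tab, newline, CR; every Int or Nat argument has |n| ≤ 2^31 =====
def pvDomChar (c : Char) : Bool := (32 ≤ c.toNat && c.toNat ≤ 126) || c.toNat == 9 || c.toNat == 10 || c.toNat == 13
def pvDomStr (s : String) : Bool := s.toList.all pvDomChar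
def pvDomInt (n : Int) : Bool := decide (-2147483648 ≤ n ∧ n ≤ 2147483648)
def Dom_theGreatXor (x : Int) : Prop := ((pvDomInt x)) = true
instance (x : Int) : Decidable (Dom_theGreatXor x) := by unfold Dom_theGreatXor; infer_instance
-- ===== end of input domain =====

-- B replaces A's per-bit while loop by the closed form (1 << x.bit_length()) - 1 - x
-- (0 for non-positive x): simpler, no loop.

-- ===== PORT A =====
-- termination helper for the while loop: x >>= 1 strictly shrinks a positive x
theorem pvShiftRight_toNat_lt (x : Int) (h : 0 < x) : (x >>> (1 : Int)).toNat < x.toNat := by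
  obtain ⟨n, rfl⟩ := Int.eq_ofNat_of_zero_le h.le
  rw [show (1 : Int) = ((1 : Nat) : Int) from rfl, Int.shiftRight_natCast]
  simp only [Int.toNat_natCast, Nat.shiftRight_succ, Nat.shiftRight_zero]
  omega

-- the while loop of A: state (x, result, bit_position); branches in source order
def theGreatXorLoop (x result bit_position : Int) : Int :=
  if h : x > 0 then
    theGreatXorLoop (x >>> (1 : Int))                 -- x >>= 1 (arithmetic shift, exact)
      (if Int.land x 1 = 0 then result + ((1 : Int) <<< bit_position) else result)
      (bit_position + 1)
  else result
termination_by x.toNat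
decreasing_by exact pvShiftRight_toNat_lt x h

def theGreatXor (x : Int) : Int :=
  theGreatXorLoop x 0 0

-- ===== PORT B =====
-- x.bit_length() for x > 0 is Nat.size x.toNat; 1 << k is an Int shift by a Nat
def theGreatXor_alt (x : Int) : Int :=
  if x ≤ 0 then 0
  else ((1 : Int) <<< Nat.size x.toNat) - 1 - x

-- ===== PRECONDITION & SPEC =====
def Spec_theGreatXor (x : Int) (out : Int) : Prop := out = theGreatXor_alt x
instance (x : Int) (out : Int) : Decidable (Spec_theGreatXor x out) := by unfold Spec_theGreatXor; infer_instance

-- ===== CLAIM (what is proved, stated in full; the proofs are below) =====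
def Claim_equal_theGreatXor : Prop := ∀ (x : Int), Dom_theGreatXor x → Spec_theGreatXor x (theGreatXor x)

-- ===== LEMMAS AND PROOFS =====

theorem pvSize_div_two (n : Nat) (h : 1 ≤ n) : Nat.size n = Nat.size (n / 2) + 1 := by
  have key : ∀ m, Nat.size (n / 2) ≤ m ↔ Nat.size n ≤ m + 1 := by
    intro m
    rw [Nat.size_le, Nat.size_le, pow_succ]
    omega
  have h1 := (key (Nat.size (n / 2))).mp le_rfl
  have h2 : 0 < Nat.size n := Nat.size_pos.mpr h
  have h3 := (key (Nat.size n - 1)).mpr (by omega)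
  omega

theorem pvLoop_eq (n : Nat) : ∀ (r : Int) (b : Nat),
    theGreatXorLoop (n : Int) r ((b : Nat) : Int)
      = r + 2 ^ b * ((2 : Int) ^ Nat.size n - 1 - (n : Int)) := by
  induction n using Nat.strong_induction_on with
  | _ n ih =>
    intro r b
    rw [theGreatXorLoop]
    by_cases h : (n : Int) > 0
    · have hn1 : 1 ≤ n := by exact_mod_cast h
      rw [dif_pos h]
      have hsr : ((n : Int)) >>> (1 : Int) = ((n / 2 : Nat) : Int) := by
        rw [show (1 : Int) = ((1 : Nat) : Int) from rfl, Int.shiftRight_natCast]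
        simp [Nat.shiftRight_succ, Nat.shiftRight_zero]
      have hland : Int.land (n : Int) 1 = (((n % 2 : Nat)) : Int) := by
        simp [Int.land, Nat.and_one_is_mod]
      have hshl : (1 : Int) <<< ((b : Nat) : Int) = 2 ^ b := by
        rw [Int.shiftLeft_eq_mul_pow]
        push_cast
        ring
      have hb1 : ((b : Nat) : Int) + 1 = (((b + 1 : Nat)) : Int) := by push_cast; ring
      rw [hsr, hland, hshl, hb1, ih (n / 2) (by omega)]
      rw [pvSize_div_two n hn1]
      have hmod : ((n % 2 : Nat) : Int) = (n : Int) - 2 * ((n / 2 : Nat) : Int) := by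
        push_cast
        omega
      by_cases hpar : ((n % 2 : Nat) : Int) = 0
      · rw [if_pos hpar]
        have : (n : Int) = 2 * ((n / 2 : Nat) : Int) := by omega
        rw [this, pow_succ, pow_succ]
        ring
      · rw [if_neg hpar]
        have : (n : Int) = 2 * ((n / 2 : Nat) : Int) + 1 := by omega
        rw [this, pow_succ, pow_succ]
        ring
    · rw [dif_neg h]
      have : n = 0 := by omega
      subst this
      simp [Nat.size_zero]

-- ===== VERDICT (by name: the statement is the Claim_ definition above) =====
theorem theGreatXor_spec : Claim_equal_theGreatXor := by
  intro x _
  unfold Spec_theGreatXor theGreatXor theGreatXor_alt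
  by_cases h : x ≤ 0
  · rw [theGreatXorLoop, dif_neg (by omega), if_pos h]
  · rw [if_neg h]
    have hx : x = ((x.toNat : Nat) : Int) := by omega
    rw [hx, show (0 : Int) = ((0 : Nat) : Int) from rfl,
      pvLoop_eq x.toNat ((0 : Nat) : Int) 0]
    simp only [Int.toNat_natCast]
    rw [Int.shiftLeft_eq]
    push_cast
    ring
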